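-- pv_equiv track=rewrite | github.com/SeongrokKim/python-practice | programmers/최고의 집합.py | solution
-- ===== SOURCE A (Python) =====
-- def solution(n, s):
--     answer = []
--     if n>s:
--         return [-1]
--
--     q = s // n
--     r = s % n
--     for i in range(n-r):
--         answer.append(q)
--     for i in range(r):
--         answer.append(q+1)
--     return answer
-- ===== SOURCE B (Python) =====
-- def solution(n, s):
--     if n > s:
--         return [-1]
--     answer = []
--     for i in range(n):
--         answer.append((s + i) // n)
--     return answer
-- ===== Notes on version B (the rewrite author's own statement) =====
-- stated objective: simpler
-- what changed: Replaces the q=s//n, r=s%n computation with two separate append loops by a single loop that computes each element directly with the closed form (s+i)//n.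
import Mathlib
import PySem

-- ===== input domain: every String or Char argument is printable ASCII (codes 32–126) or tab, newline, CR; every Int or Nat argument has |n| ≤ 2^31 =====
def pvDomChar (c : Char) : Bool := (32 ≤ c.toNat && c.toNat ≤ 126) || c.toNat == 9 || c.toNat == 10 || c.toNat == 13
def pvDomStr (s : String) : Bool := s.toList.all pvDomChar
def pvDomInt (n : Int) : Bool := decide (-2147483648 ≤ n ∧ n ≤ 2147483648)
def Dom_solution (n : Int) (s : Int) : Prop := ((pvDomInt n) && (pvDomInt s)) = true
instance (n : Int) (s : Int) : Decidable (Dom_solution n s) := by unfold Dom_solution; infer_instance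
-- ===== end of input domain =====

-- B replaces A's quotient/remainder bookkeeping and two append loops with one loop
-- computing each element by the closed form (s+i)//n (objective: simpler).

-- ===== PORT A =====
def solution (n : Int) (s : Int) : List Int :=
  if n > s then [-1]
  else
    let q := PySem.Int.floordiv s n
    let r := PySem.Int.mod s n
    let answer := (PySem.List.pyRange 0 (n - r) 1).foldl (fun acc _ => acc ++ [q]) []
    (PySem.List.pyRange 0 r 1).foldl (fun acc _ => acc ++ [q + 1]) answer

-- ===== PORT B =====
def solution_alt (n : Int) (s : Int) : List Int :=
  if n > s then [-1]
  else
    (PySem.List.pyRange 0 n 1).foldl (fun acc i => acc ++ [PySem.Int.floordiv (s + i) n]) []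

-- ===== PRECONDITION & SPEC =====
-- Pre_ excludes exactly n = 0 with 0 ≤ s, where A's 's // n' raises ZeroDivisionError.
def Pre_solution (n : Int) (s : Int) : Prop := ¬ (n = 0 ∧ 0 ≤ s)
instance (n : Int) (s : Int) : Decidable (Pre_solution n s) := by unfold Pre_solution; infer_instance
def pvWitness_solution : Int × Int := (3, 7)

def Spec_solution (n : Int) (s : Int) (out : List Int) : Prop := out = solution_alt n s
instance (n : Int) (s : Int) (out : List Int) : Decidable (Spec_solution n s out) := by unfold Spec_solution; infer_instance

-- ===== CLAIM (what is proved, stated in full; the proofs are below) =====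
def Claim_equal_solution : Prop := ∀ (n : Int) (s : Int), Dom_solution n s → Pre_solution n s → Spec_solution n s (solution n s)

-- ===== LEMMAS AND PROOFS =====

theorem solution_eq_alt (n s : Int) (hpre : Pre_solution n s) : solution n s = solution_alt n s := by
  unfold solution solution_alt
  by_cases hgt : n > s
  · simp [hgt]
  · simp only [if_neg hgt]
    replace hgt : n ≤ s := le_of_not_gt hgt
    have hn0 : n ≠ 0 := by
      intro h
      exact hpre ⟨h, h ▸ hgt⟩
    rw [PySem.List.foldl_append_singleton_eq_map, PySem.List.foldl_append_singleton_eq_map,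
        PySem.List.foldl_append_singleton_eq_map]
    simp only [List.nil_append]
    rcases lt_or_gt_of_ne hn0 with hneg | hpos
    · -- n < 0: all three ranges are empty
      obtain ⟨hr1, hr2⟩ := PySem.Int.mod_neg_bounds s hneg
      rw [PySem.List.pyRange_one_eq_nil (by omega), PySem.List.pyRange_one_eq_nil (by omega),
          PySem.List.pyRange_one_eq_nil (by omega)]
      simp
    · -- n > 0
      have hqr : PySem.Int.floordiv s n * n + PySem.Int.mod s n = s :=
        PySem.Int.floordiv_mul_add_mod s n
      have hr0 : 0 ≤ PySem.Int.mod s n := PySem.Int.mod_nonneg s hpos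
      have hrn : PySem.Int.mod s n < n := PySem.Int.mod_lt s hpos
      set q := PySem.Int.floordiv s n with hq
      set r := PySem.Int.mod s n with hr
      rw [PySem.List.pyRange_one_append 0 (n - r) n (by omega) (by omega), List.map_append]
      congr 1
      · refine (List.map_congr_left ?_).symm
        intro x hx
        rw [PySem.List.mem_pyRange_one] at hx
        rw [PySem.Int.floordiv_eq_iff_of_pos hpos]
        constructor <;> nlinarith [hqr, hx.1, hx.2]
      · have h1 : (PySem.List.pyRange 0 r 1).map (fun _ => q + 1) = List.replicate r.toNat (q + 1) := by
          rw [List.map_const', PySem.List.length_pyRange_one]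
          norm_num
        have h2 : (PySem.List.pyRange (n - r) n 1).map (fun i => PySem.Int.floordiv (s + i) n)
            = List.replicate r.toNat (q + 1) := by
          have hc : (PySem.List.pyRange (n - r) n 1).map (fun i => PySem.Int.floordiv (s + i) n)
              = (PySem.List.pyRange (n - r) n 1).map (fun _ => q + 1) := by
            refine List.map_congr_left ?_
            intro x hx
            rw [PySem.List.mem_pyRange_one] at hx
            rw [PySem.Int.floordiv_eq_iff_of_pos hpos]
            constructor <;> nlinarith [hqr, hx.1, hx.2]
          rw [hc, List.map_const', PySem.List.length_pyRange_one]
          congr 1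
          omega
        rw [h1, h2]

-- ===== VERDICT (by name: the statement is the Claim_ definition above) =====
theorem solution_spec : Claim_equal_solution := by
  intro n s _ hpre
  unfold Spec_solution
  exact solution_eq_alt n s hpre
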